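-- pv_equiv track=rewrite | github.com/OfflineIMAP/offlineimap3 | offlineimap/imaputil.py | uid_sequence
-- ===== SOURCE A (Python) =====
-- def uid_sequence(uidlist):
--     """Collapse UID lists into shorter sequence sets
--
--     [1,2,3,4,5,10,12,13] will return "1:5,10,12:13".  This function sorts
--     the list, and only collapses if subsequent entries form a range.
--     :returns: The collapsed UID list as string."""
--
--     def getrange(start, end):
--         if start == end:
--             return str(start)
--         return "%s:%s" % (start, end)
--
--     if not len(uidlist):
--         return ''  # Empty list, return
--
--     start, end = None, None
--     retval = []
--     # Force items to be longs and sort them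
--     sorted_uids = sorted(map(int, uidlist))
--
--     for item in iter(sorted_uids):
--         item = int(item)
--         if start is None:  # First item
--             start, end = item, item
--         elif item == end + 1:  # Next item in a range
--             end = item
--         else:  # Starting a new range
--             retval.append(getrange(start, end))
--             start, end = item, item
--
--     retval.append(getrange(start, end))  # Add final range/item
--     return ",".join(retval)
-- ===== SOURCE B (Python) =====
-- def uid_sequence(uidlist):
--     """Collapse UID lists into shorter sequence sets (divide and conquer)."""
--
--     def merge(left, right):
--         # Join two adjacent range lists, fusing the boundary ranges when consecutive.
--         (ls, le), (rs, re) = left[-1], right[0]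
--         if rs == le + 1:
--             return left[:-1] + [(ls, re)] + right[1:]
--         return left + right
--
--     def ranges(seg):
--         if len(seg) <= 1:
--             return [(seg[0], seg[0])] if seg else []
--         mid = len(seg) // 2
--         return merge(ranges(seg[:mid]), ranges(seg[mid:]))
--
--     return ",".join(str(a) if a == b else "%s:%s" % (a, b)
--                     for a, b in ranges(sorted(map(int, uidlist))))
-- ===== Notes on version B (the rewrite author's own statement) =====
-- stated objective: alternative
-- what changed: Replaces A's single start/end accumulator scan with a divide-and-conquer: the sorted list is split in halves, each half is collapsed recursively into a list of (start,end) ranges, and the two range lists are merged by fusing the boundary ranges when consecutive; formatting is a separate final pass.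
import Mathlib
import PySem

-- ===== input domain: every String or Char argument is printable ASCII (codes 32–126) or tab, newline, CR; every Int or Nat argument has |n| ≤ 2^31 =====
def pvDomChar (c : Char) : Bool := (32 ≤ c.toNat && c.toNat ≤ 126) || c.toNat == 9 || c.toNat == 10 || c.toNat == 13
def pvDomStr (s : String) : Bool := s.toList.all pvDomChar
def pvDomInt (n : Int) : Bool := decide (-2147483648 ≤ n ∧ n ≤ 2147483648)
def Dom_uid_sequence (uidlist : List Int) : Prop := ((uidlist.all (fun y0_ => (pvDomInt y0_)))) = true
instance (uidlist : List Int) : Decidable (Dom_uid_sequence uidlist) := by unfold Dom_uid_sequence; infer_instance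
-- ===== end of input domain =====

-- B replaces A's start/end accumulator scan with a divide-and-conquer over halves of the sorted list (alternative; same cost).

-- ===== PORT A =====
-- Python helper getrange(start, end)
def getrange (s e : Int) : String :=
  if s = e then PySem.Int.toStr s
  else PySem.Str.join ":" [PySem.Int.toStr s, PySem.Int.toStr e]

-- the body of A's for-loop (state: (start,end) option × retval)
def stepA (acc : Option (Int × Int) × List String) (item : Int) :
    Option (Int × Int) × List String :=
  match acc.1 with
  | none => (some (item, item), acc.2)
  | some (s, e) =>
    if item = e + 1 then (some (s, item), acc.2)
    else (some (item, item), acc.2 ++ [getrange s e])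

def uid_sequence (uidlist : List Int) : String :=
  if uidlist.length = 0 then ""
  else
    let sorted_uids := PySem.List.sorted (uidlist.map (fun x => x)) (fun x => x) false
    let st := sorted_uids.foldl stepA (none, [])
    match st.1 with
    | none => PySem.Str.join "," st.2          -- unreachable: the list is nonempty
    | some (s, e) => PySem.Str.join "," (st.2 ++ [getrange s e])

-- ===== PORT B =====
-- Python helper merge(left, right); the catch-all arm is the totality guard for the
-- empty cases Python never reaches (ranges is only applied to nonempty segments).
def mergeRanges (l r : List (Int × Int)) : List (Int × Int) :=
  match l.getLast?, r.head? with
  | some (ls, le), some (rs, re) =>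
    if rs = le + 1 then l.dropLast ++ [(ls, re)] ++ r.tail
    else l ++ r
  | _, _ => l ++ r

-- Python helper ranges(seg): collapse a segment into (start,end) ranges by halving
def rangesB (seg : List Int) : List (Int × Int) :=
  if seg.length ≤ 1 then
    match seg with
    | [] => []
    | x :: _ => [(x, x)]
  else
    mergeRanges (rangesB (seg.take (seg.length / 2))) (rangesB (seg.drop (seg.length / 2)))
termination_by seg.length
decreasing_by
  · simp only [List.length_take]; omega
  · simp only [List.length_drop]; omega

-- str(a) if a == b else "%s:%s" % (a, b)
def fmtR (a b : Int) : String :=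
  if a = b then PySem.Int.toStr a
  else PySem.Str.join ":" [PySem.Int.toStr a, PySem.Int.toStr b]

def uid_sequence_alt (uidlist : List Int) : String :=
  PySem.Str.join ","
    ((rangesB (PySem.List.sorted (uidlist.map (fun x => x)) (fun x => x) false)).map
      (fun p => fmtR p.1 p.2))

-- ===== PRECONDITION & SPEC =====
def Spec_uid_sequence (uidlist : List Int) (out : String) : Prop := out = uid_sequence_alt uidlist
instance (uidlist : List Int) (out : String) : Decidable (Spec_uid_sequence uidlist out) := by unfold Spec_uid_sequence; infer_instance

-- ===== CLAIM (what is proved, stated in full; the proofs are below) =====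
def Claim_equal_uid_sequence : Prop := ∀ (uidlist : List Int), Dom_uid_sequence uidlist → Spec_uid_sequence uidlist (uid_sequence uidlist)

-- ===== LEMMAS AND PROOFS =====

-- the list of maximal consecutive runs produced by an (s,e)-started scan over xs
def runs (s e : Int) : List Int → List (Int × Int)
  | [] => [(s, e)]
  | y :: ys => if y = e + 1 then runs s y ys else (s, e) :: runs y y ys

def runsList : List Int → List (Int × Int)
  | [] => []
  | x :: t => runs x x t

lemma runs_ne_nil (s e : Int) (xs : List Int) : runs s e xs ≠ [] := by
  induction xs generalizing s e with
  | nil => simp [runs]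
  | cons y ys ih =>
    by_cases h : y = e + 1 <;> simp [runs, h, ih]

-- the start of the first run is the only place s enters runs
lemma runs_start (ys : List Int) : ∀ e s s',
    runs s' e ys = (s', ((runs s e ys).headD (0, 0)).2) :: (runs s e ys).tail := by
  induction ys with
  | nil => intro e s s'; simp [runs]
  | cons y ys ih =>
    intro e s s'
    by_cases h : y = e + 1
    · simp only [runs, if_pos h]
      rw [ih y s s', ih y s s]
    · simp [runs, if_neg h]

lemma foldA (xs : List Int) : ∀ s e acc,
    ∃ p q t, xs.foldl stepA (some (s, e), acc) = (some (p, q), t) ∧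
      t ++ [getrange p q] = acc ++ (runs s e xs).map (fun r => getrange r.1 r.2) := by
  induction xs with
  | nil => intro s e acc; exact ⟨s, e, acc, rfl, by simp [runs]⟩
  | cons y ys ih =>
    intro s e acc
    by_cases h : y = e + 1
    · obtain ⟨p, q, t, h1, h2⟩ := ih s y acc
      exact ⟨p, q, t, by simpa [stepA, h] using h1, by simpa [runs, h] using h2⟩
    · obtain ⟨p, q, t, h1, h2⟩ := ih y y (acc ++ [getrange s e])
      refine ⟨p, q, t, by simpa [stepA, h] using h1, ?_⟩
      rw [h2]; simp [runs, h]

lemma mergeRanges_cons (p : Int × Int) (L R : List (Int × Int)) (h : L ≠ []) :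
    mergeRanges (p :: L) R = p :: mergeRanges L R := by
  obtain ⟨q, L', rfl⟩ := List.exists_cons_of_ne_nil h
  unfold mergeRanges
  cases hR : R.head? with
  | none => simp
  | some r =>
    obtain ⟨rs, re⟩ := r
    rcases hL : (q :: L').getLast? with _ | ⟨ls, le⟩
    · simp at hL
    · simp only [List.getLast?_cons_cons, hL]
      split_ifs <;> simp

-- the key merge law: a scan over an appended list merges the two scans at the seam
lemma runs_append (z : Int) (zs xs : List Int) : ∀ s e,
    runs s e (xs ++ z :: zs) = mergeRanges (runs s e xs) (runs z z zs) := by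
  induction xs with
  | nil =>
    intro s e
    have hz := runs_start zs z z z
    -- runs z z zs = (z, c) :: tail
    rw [List.nil_append]
    show runs s e (z :: zs) = _
    unfold mergeRanges
    rw [hz]
    simp only [runs, List.getLast?_singleton, List.head?_cons, List.dropLast_singleton,
      List.tail_cons]
    by_cases h : z = e + 1
    · simp only [if_pos h]
      rw [runs_start zs z z s]
      simp
    · simp only [if_neg h, List.singleton_append]
      exact congrArg _ hz
  | cons x xs' ih =>
    intro s e
    by_cases h : x = e + 1
    · simpa [runs, h] using ih s x
    · have : runs s e ((x :: xs') ++ z :: zs) = (s, e) :: runs x x (xs' ++ z :: zs) := by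
        simp [runs, h]
      rw [this, ih x x, ← mergeRanges_cons _ _ _ (runs_ne_nil x x xs')]
      simp [runs, h]

lemma rangesB_eq_aux : ∀ n (seg : List Int), seg.length ≤ n → rangesB seg = runsList seg := by
  intro n
  induction n with
  | zero =>
    intro seg h
    have : seg = [] := by
      cases seg with
      | nil => rfl
      | cons a t => simp at h
    subst this; rw [rangesB.eq_def]; simp [runsList]
  | succ n ih =>
    intro seg hlen
    by_cases h : seg.length ≤ 1
    · rw [rangesB.eq_def]
      cases seg with
      | nil => simp [runsList]
      | cons x t =>
        cases t with
        | nil => simp [runsList, runs]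
        | cons b t' => simp at h
    · rw [rangesB.eq_def, if_neg h]
      set mid := seg.length / 2 with hmid
      have h2 : 2 ≤ seg.length := by omega
      have hmid1 : 1 ≤ mid := by omega
      have hmidlt : mid < seg.length := by omega
      have htake : (seg.take mid).length ≤ n := by
        simp only [List.length_take]; omega
      have hdrop : (seg.drop mid).length ≤ n := by
        simp only [List.length_drop]; omega
      rw [ih _ htake, ih _ hdrop]
      -- both halves are nonempty
      obtain ⟨x, t', hT⟩ : ∃ x t', seg.take mid = x :: t' := by
        cases hc : seg.take mid with
        | nil =>
          exfalso
          have := congrArg List.length hc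
          simp only [List.length_take, List.length_nil] at this
          omega
        | cons a b => exact ⟨a, b, rfl⟩
      obtain ⟨z, zs, hD⟩ : ∃ z zs, seg.drop mid = z :: zs := by
        cases hc : seg.drop mid with
        | nil =>
          exfalso
          have := congrArg List.length hc
          simp only [List.length_drop, List.length_nil] at this
          omega
        | cons a b => exact ⟨a, b, rfl⟩
      have hsplit : seg = x :: (t' ++ z :: zs) := by
        conv_lhs => rw [← List.take_append_drop mid seg]
        rw [hT, hD]; rfl
      rw [hT, hD, hsplit]
      show mergeRanges (runs x x t') (runs z z zs) = runs x x (t' ++ z :: zs)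
      rw [runs_append]

lemma rangesB_eq (seg : List Int) : rangesB seg = runsList seg :=
  rangesB_eq_aux seg.length seg le_rfl

lemma fmtR_eq : (fun p : Int × Int => fmtR p.1 p.2) = (fun r : Int × Int => getrange r.1 r.2) := by
  funext p; rfl

-- ===== VERDICT (by name: the statement is the Claim_ definition above) =====
theorem uid_sequence_spec : Claim_equal_uid_sequence := by
  intro uidlist _
  unfold Spec_uid_sequence uid_sequence uid_sequence_alt
  rcases hs : PySem.List.sorted (uidlist.map (fun x => x)) (fun x => x) false with _ | ⟨m, t⟩
  · have : uidlist = [] := by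
      have := (PySem.List.sorted_eq_nil_iff (xs := uidlist.map (fun x => x))
        (key := fun x => x) (rev := false)).1 hs
      simpa using this
    subst this
    simp [rangesB.eq_def, PySem.Str.join]
  · have hne : uidlist.length ≠ 0 := by
      intro h0
      rw [List.length_eq_zero_iff] at h0
      subst h0; simp [PySem.List.sorted] at hs
    simp only [if_neg hne]
    obtain ⟨p, q, tl, h1, h2⟩ := foldA t m m []
    have hstep : stepA (none, []) m = (some (m, m), []) := rfl
    rw [List.foldl_cons, hstep, h1]
    rw [rangesB_eq]
    show PySem.Str.join "," (tl ++ [getrange p q]) =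
      PySem.Str.join "," ((runs m m t).map (fun p => fmtR p.1 p.2))
    rw [fmtR_eq]
    simp only [List.nil_append] at h2
    rw [← h2]
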